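-- pv_equiv track=rewrite | github.com/Rrexon/RunningKey-DoubleColumnarTrans_Ciphers | verzioni2.py | running_key_encryption_alg
-- ===== SOURCE A (Python) =====
-- def extend_key(key, length):
--     """
--     E zgjat key-in deri në gjatësinë e tekstit.
--     Kjo është baza e Running Key cipher.
--     """
--     key = key.replace(" ", "").lower()
--
--     # Mbrojtje nga crash nëse key është bosh
--     if len(key) == 0:
--         return ""
--
--     return (key * (length // len(key) + 1))[:length]
--
-- def running_key_encryption_alg(key, plaintext):
--
--     ciphertext = ""
--
--     # e standardizojmë plaintext
--     plaintext = plaintext.lower()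
--
--     # marrim vetëm shkronjat për llogaritje të key
--     plaintext_letters_only = plaintext.replace(" ", "").lower()
--
--     # zgjasim key-in sipas gjatësisë së shkronjave
--     key_extended = extend_key(key, len(plaintext_letters_only))
--
--     j = 0  # index për key
--
--     for ch in plaintext:
--
--         # ruajmë hapësirat pa ndryshim
--         if ch == " ":
--             ciphertext += " "
--             continue
--
--         # konvertim shkronjash në numra (a=0 ... z=25)
--         p_value = ord(ch) - ord('a')
--         k_value = ord(key_extended[j]) - ord('a')
--
--         # formula e encryption (mod 26)
--         c_value = (p_value + k_value) % 26
--
--         ciphertext += chr(c_value + ord('a'))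
--
--         j += 1
--
--     return ciphertext
-- ===== SOURCE B (Python) =====
-- def running_key_encryption_alg(key, plaintext):
--     # No key extension at all: the effective key letter for the n-th letter is
--     # key_clean[n % len(key_clean)]; the text is processed word by word via split/join.
--     key_clean = key.replace(" ", "").lower()
--     n = len(key_clean)
--     pieces = []
--     pos = 0  # count of letters consumed so far
--     for word in plaintext.lower().split(" "):
--         pieces.append("".join(
--             chr((ord(p) - 97 + ord(key_clean[(pos + i) % n]) - 97) % 26 + 97)
--             for i, p in enumerate(word)))
--         pos += len(word)
--     return " ".join(pieces)
-- ===== Notes on version B (the rewrite author's own statement) =====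
-- stated objective: alternative
-- what changed: B eliminates extend_key entirely: instead of materialising a key string stretched to the letter count and walking it with a j counter inside one stateful space-branching loop, B addresses the cleaned key directly by modular index (pos+i) % len(key) and traverses the text word by word via split(' ')/join, encrypting each word with an enumerate comprehension while accumulating the letter offset. Pre_ excludes only inputs on which both programs raise (key with no non-space character while the plaintext has a non-space character; A IndexError, B ZeroDivisionError).
import Mathlib
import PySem

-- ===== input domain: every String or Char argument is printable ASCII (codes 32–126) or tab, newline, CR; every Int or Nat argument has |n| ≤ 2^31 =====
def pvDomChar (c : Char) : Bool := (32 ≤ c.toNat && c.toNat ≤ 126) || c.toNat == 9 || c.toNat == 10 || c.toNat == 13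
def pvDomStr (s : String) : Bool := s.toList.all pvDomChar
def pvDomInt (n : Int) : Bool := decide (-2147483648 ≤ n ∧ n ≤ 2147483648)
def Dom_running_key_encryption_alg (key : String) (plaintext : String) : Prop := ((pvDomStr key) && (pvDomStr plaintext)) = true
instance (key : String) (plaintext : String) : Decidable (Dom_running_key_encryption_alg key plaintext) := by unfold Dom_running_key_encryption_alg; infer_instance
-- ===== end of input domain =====

-- B drops extend_key in favour of modular key indexing and traverses the text
-- word by word (split/join) instead of A's single stateful space-branching loop
-- (objective: alternative decomposition, same cost).

-- ===== PORT A =====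

-- extend_key: lowercased, space-free key repeated and truncated.
-- Python '//' on the two nonnegative lengths equals Nat division, used exactly here.
def extendKey (key : String) (length : Nat) : List Char :=
  let k := PySem.Chars.lower (PySem.Chars.replace key.toList [' '] [])
  if k.length = 0 then []
  else ((List.replicate (length / k.length + 1) k).flatten).take length

-- chr(((ord p - 97) + (ord k - 97)) % 26 + 97): identical character formula in both
-- Python sources; Python '%' is PySem.Int.mod (floor), needed because ord p - 97 is
-- negative for punctuation below 'a'.
def pvEncChar (p k : Char) : Char :=
  Char.ofNat ((PySem.Int.mod (((p.toNat : Int) - 97) + ((k.toNat : Int) - 97)) 26).toNat + 97)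

-- A's for-loop: accumulates the ciphertext and the key index j.
-- key_extended[j]: Python raises IndexError when out of range (Pre_ excludes that);
-- the .getD 'a' default is never reached under Pre_.
def pvLoopA (ke : List Char) : List Char → List Char → Nat → List Char
  | [], acc, _ => acc
  | ch :: rest, acc, j =>
    if ch = ' ' then pvLoopA ke rest (acc ++ [' ']) j
    else pvLoopA ke rest (acc ++ [pvEncChar ch ((PySem.List.pyGet? ke (j : Int)).getD 'a')]) (j + 1)

def running_key_encryption_alg (key : String) (plaintext : String) : String :=
  let pt := PySem.Chars.lower plaintext.toList
  let lettersOnly := PySem.Chars.lower (PySem.Chars.replace pt [' '] [])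
  let ke := extendKey key lettersOnly.length
  String.ofList (pvLoopA ke pt [] 0)

-- ===== PORT B =====

-- key_clean[(pos + i) % n]: total stand-in via getD; Python raises there exactly
-- when n = 0 (ZeroDivisionError), which Pre_ excludes.
def pvKeyAt (k : List Char) (m : Int) : Char :=
  (PySem.List.pyGet? k (PySem.Int.mod m (k.length : Int))).getD 'a'

-- the per-word enumerate comprehension
def pvEncWord (k : List Char) (pos : Nat) (w : List Char) : List Char :=
  (PySem.List.enumerate w).map (fun ip => pvEncChar ip.2 (pvKeyAt k ((pos : Int) + ip.1)))

-- the for-word loop: appends one encrypted piece per word, advancing pos by the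
-- word length (structural recursion building pieces front-to-back).
def pvWordsGo (k : List Char) : List (List Char) → Nat → List (List Char)
  | [], _ => []
  | w :: ws, pos => pvEncWord k pos w :: pvWordsGo k ws (pos + w.length)

-- split(" ") / " ".join ported as the corresponding Lean functions
def running_key_encryption_alg_alt (key : String) (plaintext : String) : String :=
  let k := PySem.Chars.lower (PySem.Chars.replace key.toList [' '] [])
  let words := (PySem.Chars.lower plaintext.toList).splitOn ' '
  String.ofList (List.intercalate [' '] (pvWordsGo k words 0))

-- ===== PRECONDITION & SPEC =====
-- Pre_ excludes exactly the inputs where Python A raises IndexError: the key has no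
-- non-space character (so the cleaned key is empty) while the plaintext has a
-- non-space character. (B raises there too, a ZeroDivisionError.)
def Pre_running_key_encryption_alg (key : String) (plaintext : String) : Prop :=
  (key.toList.any (fun c => c != ' ')) = true ∨ (plaintext.toList.all (fun c => c == ' ')) = true
instance (key : String) (plaintext : String) : Decidable (Pre_running_key_encryption_alg key plaintext) := by unfold Pre_running_key_encryption_alg; infer_instance

def pvWitness_running_key_encryption_alg : String × String := ("Key", "Hello World!")

def Spec_running_key_encryption_alg (key : String) (plaintext : String) (out : String) : Prop := out = running_key_encryption_alg_alt key plaintext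
instance (key : String) (plaintext : String) (out : String) : Decidable (Spec_running_key_encryption_alg key plaintext out) := by unfold Spec_running_key_encryption_alg; infer_instance

-- ===== CLAIM (what is proved, stated in full; the proofs are below) =====
def Claim_equal_running_key_encryption_alg : Prop := ∀ (key : String) (plaintext : String), Dom_running_key_encryption_alg key plaintext → Pre_running_key_encryption_alg key plaintext → Spec_running_key_encryption_alg key plaintext (running_key_encryption_alg key plaintext)

-- ===== LEMMAS AND PROOFS =====

-- ===== LEMMAS AND PROOFS =====

-- replace.go with old = [' '], new = [] is a filter (enough fuel)
theorem pv_go_space : ∀ (l : List Char) (fuel : Nat) (acc : List Char), l.length ≤ fuel →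
    PySem.Chars.replace.go [' '] [] fuel l acc = acc.reverse ++ l.filter (fun c => c != ' ')
  | [], 0, acc, _ => by simp [PySem.Chars.replace.go]
  | [], fuel+1, acc, _ => by simp [PySem.Chars.replace.go]
  | c :: t, fuel+1, acc, h => by
    rw [PySem.Chars.replace.go]
    by_cases hc : c = ' '
    · subst hc
      simp only [List.isPrefixOf, BEq.rfl, Bool.true_and, if_pos, List.drop_succ_cons,
        List.length_nil, List.drop_zero, List.length_cons, List.reverse_nil, List.nil_append]
      rw [pv_go_space t fuel acc (by simpa using h)]
      simp
    · have : [' '].isPrefixOf (c :: t) = false := by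
        simp [List.isPrefixOf]; exact fun hh => hc (by simpa using hh.symm)
      rw [this]
      simp only [Bool.false_eq_true, if_false]
      rw [pv_go_space t fuel (c :: acc) (by simpa using h)]
      simp [hc]

-- s.replace(" ", "") removes exactly the spaces
theorem pv_replace_space (s : List Char) :
    PySem.Chars.replace s [' '] [] = s.filter (fun c => c != ' ') := by
  rw [PySem.Chars.replace]
  simpa using pv_go_space s s.length [] le_rfl

theorem pv_length_lower (s : List Char) : (PySem.Chars.lower s).length = s.length := by
  simp [PySem.Chars.lower]

-- the common specification recursion: one pass over the text, key accessor abstracted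
def pvE (f : Nat → Char) : Nat → List Char → List Char
  | _, [] => []
  | j, c :: cs => if c = ' ' then ' ' :: pvE f j cs
                  else pvEncChar c (f j) :: pvE f (j+1) cs

-- A's loop equals pvE with the extended-key accessor
theorem pv_loopA_eq (ke : List Char) : ∀ (cs acc : List Char) (j : Nat),
    pvLoopA ke cs acc j = acc ++ pvE (fun i => (PySem.List.pyGet? ke (i : Int)).getD 'a') j cs
  | [], acc, _ => by simp [pvLoopA, pvE]
  | c :: cs, acc, j => by
    by_cases hc : c = ' '
    · subst hc
      rw [pvLoopA, if_pos rfl, pvE, if_pos rfl, pv_loopA_eq ke cs (acc ++ [' ']) j]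
      simp
    · rw [pvLoopA, if_neg hc, pvE, if_neg hc, pv_loopA_eq ke cs _ (j + 1)]
      simp

-- pvE only looks at accessor values below j + (number of non-space chars)
theorem pvE_congr (f g : Nat → Char) : ∀ (cs : List Char) (j : Nat),
    (∀ i, j ≤ i → i < j + (cs.filter (fun c => c != ' ')).length → f i = g i) →
    pvE f j cs = pvE g j cs
  | [], _, _ => rfl
  | c :: cs, j, h => by
    by_cases hc : c = ' '
    · subst hc
      rw [pvE, if_pos rfl, pvE, if_pos rfl,
        pvE_congr f g cs j (fun i h1 h2 => h i h1 (by simpa using h2))]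
    · have hf : ((c :: cs).filter (fun c => c != ' ')).length
          = (cs.filter (fun c => c != ' ')).length + 1 := by simp [hc]
      rw [pvE, if_neg hc, pvE, if_neg hc,
        h j le_rfl (by omega),
        pvE_congr f g cs (j+1) (fun i h1 h2 => h i (by omega) (by omega))]

-- the per-word comprehension is the word recursion below
def pvWordE (k : List Char) : Nat → List Char → List Char
  | _, [] => []
  | pos, c :: w => pvEncChar c (pvKeyAt k (pos : Int)) :: pvWordE k (pos+1) w

theorem pv_encWord_go (k : List Char) : ∀ (w : List Char) (pos s : Nat),
    (PySem.List.enumerate w (s : Int)).map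
        (fun ip => pvEncChar ip.2 (pvKeyAt k ((pos : Int) + ip.1)))
      = pvWordE k (pos + s) w
  | [], _, _ => by simp [PySem.List.enumerate_nil, pvWordE]
  | c :: w, pos, s => by
    rw [PySem.List.enumerate_cons, List.map_cons, pvWordE]
    have h1 : (pos : Int) + (s : Int) = ((pos + s : Nat) : Int) := by push_cast; ring
    have h2 : (s : Int) + 1 = ((s + 1 : Nat) : Int) := by push_cast; ring
    rw [h1, h2, pv_encWord_go k w pos (s + 1)]
    have : pos + (s + 1) = pos + s + 1 := by omega
    rw [this]

theorem pv_encWord_eq (k : List Char) (w : List Char) (pos : Nat) :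
    pvEncWord k pos w = pvWordE k pos w := by
  have := pv_encWord_go k w pos 0
  simpa [pvEncWord] using this

-- intercalate helpers
theorem pv_ic_singleton (x : List Char) : List.intercalate [' '] [x] = x := by
  simp [List.intercalate]

theorem pv_ic_cons_cons (x y : List Char) (l : List (List Char)) :
    List.intercalate [' '] (x :: y :: l) = x ++ ' ' :: List.intercalate [' '] (y :: l) := by
  simp [List.intercalate]

theorem pv_ic_cons_head (a : Char) (x : List Char) (l : List (List Char)) :
    List.intercalate [' '] ((a :: x) :: l) = a :: List.intercalate [' '] (x :: l) := by
  cases l with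
  | nil => rw [pv_ic_singleton, pv_ic_singleton]
  | cons y l => rw [pv_ic_cons_cons, pv_ic_cons_cons]; rfl

-- B's split/word-loop/join pipeline equals pvE with the modular accessor
theorem pv_B_eq (k : List Char) : ∀ (cs : List Char) (pos : Nat),
    List.intercalate [' '] (pvWordsGo k (cs.splitOn ' ') pos)
      = pvE (fun i => pvKeyAt k (i : Int)) pos cs
  | [], pos => by
    simp [List.splitOn_nil, pvWordsGo, pvEncWord, PySem.List.enumerate_nil,
      pv_ic_singleton, pvE]
  | c :: cs, pos => by
    by_cases hc : c = ' '
    · subst hc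
      have hs : ((' ' : Char) :: cs).splitOn ' ' = [] :: cs.splitOn ' ' := by
        simp [List.splitOn, List.splitOnP_cons]
      rw [hs, pvE, if_pos rfl, ← pv_B_eq k cs pos]
      rw [pvWordsGo]
      have hne : cs.splitOn ' ' ≠ [] := List.splitOnP_ne_nil _ _
      obtain ⟨w, ws, hw⟩ := List.exists_cons_of_ne_nil hne
      rw [hw, pvWordsGo]
      rw [pv_ic_cons_cons]
      simp [pvEncWord, PySem.List.enumerate_nil, pvWordsGo]
    · have hne : cs.splitOn ' ' ≠ [] := List.splitOnP_ne_nil _ _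
      obtain ⟨w, ws, hw⟩ := List.exists_cons_of_ne_nil hne
      have hs : (c :: cs).splitOn ' ' = (c :: w) :: ws := by
        simp only [List.splitOn, List.splitOnP_cons]
        have : ((c == ' ') = false) := by simpa using hc
        rw [this]
        simp only [Bool.false_eq_true, if_false]
        have hw' : cs.splitOnP (· == ' ') = w :: ws := by simpa [List.splitOn] using hw
        rw [hw']
        rfl
      rw [hs, pvWordsGo, pv_encWord_eq, pvWordE, pv_ic_cons_head, pvE, if_neg hc]
      have IH := pv_B_eq k cs (pos + 1)
      rw [hw, pvWordsGo, pv_encWord_eq] at IH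
      simp only [List.length_cons]
      have : pos + (w.length + 1) = pos + 1 + w.length := by omega
      rw [this, IH]
  termination_by cs _pos => cs.length

-- element j of the flattened replicated key is k[j % n]
theorem pv_flatten_rep (k : List Char) : ∀ (m j : Nat), j < m * k.length →
    (List.flatten (List.replicate m k))[j]? = k[j % k.length]?
  | 0, j, h => by simp at h
  | m+1, j, h => by
    rw [List.replicate_succ, List.flatten_cons]
    by_cases hj : j < k.length
    · rw [List.getElem?_append_left hj, Nat.mod_eq_of_lt hj]
    · have hk : 0 < k.length := by
        rcases Nat.eq_zero_or_pos k.length with h0 | h0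
        · rw [h0] at h; simp at h
        · exact h0
      have hmul : (m+1) * k.length = m * k.length + k.length := by ring
      have hle : k.length ≤ j := Nat.le_of_not_lt hj
      rw [List.getElem?_append_right hle]
      rw [pv_flatten_rep k m (j - k.length) (by omega)]
      conv_rhs => rw [Nat.mod_eq_sub_mod hle]

-- under Pre_, the extended-key accessor agrees with the modular accessor below L
theorem pv_access_eq (key : String) (L : Nat)
    (hk : (PySem.Chars.lower (PySem.Chars.replace key.toList [' '] [])) ≠ []) :
    ∀ i, i < L →
      (PySem.List.pyGet? (extendKey key L) (i : Int)).getD 'a'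
        = pvKeyAt (PySem.Chars.lower (PySem.Chars.replace key.toList [' '] [])) (i : Int) := by
  intro i hi
  set k := PySem.Chars.lower (PySem.Chars.replace key.toList [' '] []) with hkdef
  have hn : 0 < k.length := List.length_pos_iff.mpr hk
  have hext : extendKey key L
      = ((List.replicate (L / k.length + 1) k).flatten).take L := by
    rw [extendKey]
    simp only [← hkdef]
    rw [if_neg (by omega)]
  rw [hext]
  rw [pvKeyAt]
  rw [PySem.Int.mod_natCast]
  rw [PySem.List.pyGet?_natCast, PySem.List.pyGet?_natCast]
  rw [List.getElem?_take, if_pos hi]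
  rw [pv_flatten_rep k (L / k.length + 1) i (by
    have h1 := Nat.div_add_mod L k.length
    have h2 : L % k.length < k.length := Nat.mod_lt _ hn
    have h3 : (L / k.length + 1) * k.length = k.length * (L / k.length) + k.length := by ring
    omega)]

-- a nonempty cleaned key, from the left branch of Pre_
theorem pv_key_ne (key : String) (h : (key.toList.any (fun c => c != ' ')) = true) :
    (PySem.Chars.lower (PySem.Chars.replace key.toList [' '] [])) ≠ [] := by
  intro hemp
  have : (PySem.Chars.lower (PySem.Chars.replace key.toList [' '] [])).length = 0 := by
    rw [hemp]; rfl
  rw [pv_length_lower, pv_replace_space] at this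
  obtain ⟨c, hc, hcs⟩ := List.any_eq_true.mp h
  have : c ∈ key.toList.filter (fun c => c != ' ') := List.mem_filter.mpr ⟨hc, hcs⟩
  rw [List.length_eq_zero_iff.mp ‹(key.toList.filter (fun c => c != ' ')).length = 0›] at this
  exact absurd this (List.not_mem_nil)

-- an all-space plaintext stays all-space after lower
theorem pv_lower_space (s : List Char) (h : (s.all (fun c => c == ' ')) = true) :
    (PySem.Chars.lower s).filter (fun c => c != ' ') = [] := by
  rw [List.filter_eq_nil_iff]
  intro c hc
  simp only [PySem.Chars.lower] at hc
  obtain ⟨d, hd, rfl⟩ := List.mem_map.mp hc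
  have : d = ' ' := by simpa using List.all_eq_true.mp h d hd
  subst this
  decide

-- ===== VERDICT (by name: the statement is the Claim_ definition above) =====
theorem running_key_encryption_alg_spec : Claim_equal_running_key_encryption_alg := by
  intro key plaintext _ hpre
  unfold Spec_running_key_encryption_alg
  unfold running_key_encryption_alg running_key_encryption_alg_alt
  simp only
  rw [pv_loopA_eq, List.nil_append, pv_B_eq]
  congr 1
  set pt := PySem.Chars.lower plaintext.toList with hpt
  set k := PySem.Chars.lower (PySem.Chars.replace key.toList [' '] []) with hk
  set L := (PySem.Chars.lower (PySem.Chars.replace pt [' '] [])).length with hL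
  have hLf : L = (pt.filter (fun c => c != ' ')).length := by
    rw [hL, pv_length_lower, pv_replace_space]
  apply pvE_congr
  intro i _ hi
  have hi' : i < L := by rw [hLf]; omega
  cases hpre with
  | inl h => exact pv_access_eq key L (pv_key_ne key h) i hi'
  | inr h =>
    exfalso
    have h0 : pt.filter (fun c => c != ' ') = [] := pv_lower_space plaintext.toList h
    rw [h0] at hi
    simp at hi
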